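-- pv_equiv track=rewrite | github.com/lephubui/command-code | youtube/python/problems/string_partition.py | string_partition
-- ===== SOURCE A (Python) =====
-- def string_partition(s):
--     # Using hash map
--     last_occurrence = {}
--     result = []
--     for i, chr in enumerate(s):
--         last_occurrence[chr] = i
--
--     start = 0
--     end = 0
--     for i, chr in enumerate(s):
--         end = max(end, last_occurrence[chr])
--         if i == end:
--             result.append(i - start + 1)
--             start = i + 1
--
--     return result
-- ===== SOURCE B (Python) =====
-- def string_partition(s):
--     # Interval-merge decomposition: map each character to its
--     # (first, last) occurrence interval, then merge overlapping
--     # intervals in first-occurrence order and emit their lengths.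
--     first = {}
--     last = {}
--     for i, ch in enumerate(s):
--         if ch not in first:
--             first[ch] = i
--         last[ch] = i
--     result = []
--     cur = None  # (start, end) of the merged interval being built
--     for ch in first:
--         f, l = first[ch], last[ch]
--         if cur is None:
--             cur = (f, l)
--         elif f > cur[1]:
--             result.append(cur[1] - cur[0] + 1)
--             cur = (f, l)
--         else:
--             cur = (cur[0], max(cur[1], l))
--     if cur is not None:
--         result.append(cur[1] - cur[0] + 1)
--     return result
-- ===== Notes on version B (the rewrite author's own statement) =====
-- stated objective: faster
-- what changed: Replaces A's per-position max-sweep with cuts at i==end by an interval-merge decomposition: one pass builds each character's (first,last) occurrence interval, then a scan over the distinct characters in first-occurrence order merges overlapping intervals and emits merged lengths.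
import Mathlib
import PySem

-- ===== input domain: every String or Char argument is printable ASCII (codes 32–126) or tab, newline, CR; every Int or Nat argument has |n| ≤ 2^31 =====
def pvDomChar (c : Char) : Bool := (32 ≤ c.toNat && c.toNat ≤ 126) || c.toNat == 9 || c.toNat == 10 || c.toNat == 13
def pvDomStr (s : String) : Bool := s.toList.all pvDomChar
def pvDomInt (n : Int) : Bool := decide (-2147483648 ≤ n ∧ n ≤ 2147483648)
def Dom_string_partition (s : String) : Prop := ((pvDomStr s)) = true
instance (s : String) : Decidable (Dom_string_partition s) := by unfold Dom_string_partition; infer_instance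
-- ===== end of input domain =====

-- B replaces A's position sweep (cut when i == running max of last occurrences) by an
-- interval-merge decomposition: build each character's (first, last) occurrence interval,
-- then merge overlapping intervals in first-occurrence order, so the second loop runs over
-- distinct characters rather than all positions (objective: faster, constant factor).

-- ===== PORT A =====
-- `last_occurrence[chr]` is looked up with default 0: the key is always present, since the
-- dict was built over the very same string, so the lookup never raises and getD 0 is exact.
def string_partition (s : String) : List Int :=
  let cs := s.toList
  let lastOcc := (PySem.List.enumerate cs).foldl (fun d p => d.insert p.2 p.1) PySem.Dict.empty
  let fin := (PySem.List.enumerate cs).foldl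
    (fun (st : Int × Int × List Int) p =>
      let e := max st.2.1 (lastOcc.getD p.2 0)
      if p.1 = e then (p.1 + 1, e, st.2.2 ++ [p.1 - st.1 + 1]) else (st.1, e, st.2.2))
    (0, 0, [])
  fin.2.2

-- ===== PORT B =====
def string_partition_alt (s : String) : List Int :=
  let cs := s.toList
  let fl := (PySem.List.enumerate cs).foldl
    (fun (d : PySem.Dict Char Int × PySem.Dict Char Int) p =>
      ((if d.1.contains p.2 then d.1 else d.1.insert p.2 p.1), d.2.insert p.2 p.1))
    (PySem.Dict.empty, PySem.Dict.empty)
  let fin := fl.1.keys.foldl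
    (fun (st : List Int × Option (Int × Int)) ch =>
      let f := fl.1.getD ch 0
      let l := fl.2.getD ch 0
      match st.2 with
      | none => (st.1, some (f, l))
      | some cur =>
          if f > cur.2 then (st.1 ++ [cur.2 - cur.1 + 1], some (f, l))
          else (st.1, some (cur.1, max cur.2 l)))
    ([], none)
  match fin.2 with
  | none => fin.1
  | some cur => fin.1 ++ [cur.2 - cur.1 + 1]

-- ===== PRECONDITION & SPEC =====
def Spec_string_partition (s : String) (out : List Int) : Prop := out = string_partition_alt s
instance (s : String) (out : List Int) : Decidable (Spec_string_partition s out) := by unfold Spec_string_partition; infer_instance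

-- ===== CLAIM (what is proved, stated in full; the proofs are below) =====
def Claim_equal_string_partition : Prop := ∀ (s : String), Dom_string_partition s → Spec_string_partition s (string_partition s)

-- ===== LEMMAS AND PROOFS =====

-- last-occurrence dict of A (and second component of B's pair fold)
def spLastD (cs : List Char) : PySem.Dict Char Int :=
  (PySem.List.enumerate cs).foldl (fun d p => d.insert p.2 p.1) PySem.Dict.empty

-- first-occurrence dict (first component of B's pair fold)
def spFirstD (cs : List Char) : PySem.Dict Char Int :=
  (PySem.List.enumerate cs).foldl
    (fun d p => if d.contains p.2 then d else d.insert p.2 p.1) PySem.Dict.empty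

-- A's loop body and B's loop body as named steps (definitional copies of the port lambdas)
def spStepA (L : PySem.Dict Char Int) (st : Int × Int × List Int) (p : Int × Char) :
    Int × Int × List Int :=
  let e := max st.2.1 (L.getD p.2 0)
  if p.1 = e then (p.1 + 1, e, st.2.2 ++ [p.1 - st.1 + 1]) else (st.1, e, st.2.2)

def spStepB (F L : PySem.Dict Char Int) (st : List Int × Option (Int × Int)) (ch : Char) :
    List Int × Option (Int × Int) :=
  let f := F.getD ch 0
  let l := L.getD ch 0
  match st.2 with
  | none => (st.1, some (f, l))
  | some cur =>
      if f > cur.2 then (st.1 ++ [cur.2 - cur.1 + 1], some (f, l))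
      else (st.1, some (cur.1, max cur.2 l))

def spA (cs : List Char) (k : Nat) : Int × Int × List Int :=
  (PySem.List.enumerate (cs.take k)).foldl (spStepA (spLastD cs)) (0, 0, [])

def spB (cs : List Char) (k : Nat) : List Int × Option (Int × Int) :=
  (spFirstD (cs.take k)).keys.foldl (spStepB (spFirstD cs) (spLastD cs)) ([], none)

lemma spFirstD_snoc_raw (xs : List Char) (x : Char) :
    spFirstD (xs ++ [x]) =
      if (spFirstD xs).contains x then spFirstD xs
      else (spFirstD xs).insert x (xs.length : Int) := by
  unfold spFirstD
  rw [PySem.List.enumerate_append, List.foldl_append]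
  simp [PySem.List.enumerate_cons, PySem.List.enumerate_nil]


lemma spFirstD_contains (xs : List Char) (c : Char) :
    (spFirstD xs).contains c = decide (c ∈ xs) := by
  induction xs using List.reverseRecOn generalizing c with
  | nil => simp [spFirstD, PySem.List.enumerate_nil]
  | append_singleton xs x ih =>
      rw [spFirstD_snoc_raw]
      by_cases hx : x ∈ xs
      · rw [if_pos (by rw [ih x]; simp [hx]), ih c]
        by_cases hc : c = x
        · subst hc; simp [hx]
        · simp [List.mem_append, hc]
      · rw [if_neg (by rw [ih x]; simp [hx]), PySem.Dict.contains_insert, ih c]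
        by_cases hc : c = x <;> simp [List.mem_append, hc]


lemma spFirstD_snoc (xs : List Char) (x : Char) :
    spFirstD (xs ++ [x]) =
      if x ∈ xs then spFirstD xs else (spFirstD xs).insert x (xs.length : Int) := by
  rw [spFirstD_snoc_raw, spFirstD_contains]
  by_cases hx : x ∈ xs <;> simp [hx]


lemma spFirstD_keys_snoc (xs : List Char) (x : Char) :
    (spFirstD (xs ++ [x])).keys =
      (spFirstD xs).keys ++ (if x ∈ xs then [] else [x]) := by
  rw [spFirstD_snoc]
  by_cases hx : x ∈ xs
  · simp [hx]
  · rw [if_neg hx, if_neg hx, PySem.Dict.keys_insert_of_not_contains]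
    rw [spFirstD_contains]; simp [hx]


lemma spLastD_snoc (xs : List Char) (x : Char) :
    spLastD (xs ++ [x]) = (spLastD xs).insert x (xs.length : Int) := by
  unfold spLastD
  rw [PySem.List.enumerate_append, List.foldl_append]
  simp [PySem.List.enumerate_cons, PySem.List.enumerate_nil]


lemma spLastD_getD_snoc (xs : List Char) (x : Char) (c : Char) (v : Int) :
    (spLastD (xs ++ [x])).getD c v =
      if c = x then (xs.length : Int) else (spLastD xs).getD c v := by
  rw [spLastD_snoc, PySem.Dict.getD_insert]


lemma spLastD_bounds (cs : List Char) (k : Nat) (hk : k < cs.length) :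
    (k : Int) ≤ (spLastD cs).getD cs[k] 0 ∧
      (spLastD cs).getD cs[k] 0 ≤ (cs.length : Int) - 1 := by
  induction cs using List.reverseRecOn generalizing k with
  | nil => simp at hk
  | append_singleton xs x ih =>
      rw [spLastD_getD_snoc]
      rcases Nat.lt_or_ge k xs.length with h | h
      · rw [List.getElem_append_left h]
        by_cases hc : xs[k] = x
        · rw [if_pos hc]; simp; omega
        · rw [if_neg hc]
          have := ih k h
          simp at *; omega
      · have hke : k = xs.length := by simp at hk; omega
        subst hke
        rw [List.getElem_append_right (by omega)]
        simp

lemma spFirstD_getD_stable (xs ys : List Char) (c : Char) (h : c ∈ xs) (v : Int) :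
    (spFirstD (xs ++ ys)).getD c v = (spFirstD xs).getD c v := by
  induction ys using List.reverseRecOn with
  | nil => simp
  | append_singleton ys y ih =>
      rw [← List.append_assoc, spFirstD_snoc]
      by_cases hy : y ∈ xs ++ ys
      · rw [if_pos hy]; exact ih
      · rw [if_neg hy, PySem.Dict.getD_insert, if_neg (by intro he; exact hy (he ▸ List.mem_append_left ys h)), ih]


lemma spFirstD_getD_fresh (cs : List Char) (k : Nat) (hk : k < cs.length)
    (hf : cs[k] ∉ cs.take k) : (spFirstD cs).getD cs[k] 0 = (k : Int) := by
  have hdec : cs = (cs.take k ++ [cs[k]]) ++ cs.drop (k + 1) := by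
    rw [List.append_assoc, List.singleton_append, ← List.drop_eq_getElem_cons hk, List.take_append_drop]
  generalize hc : cs[k] = c at hf hdec ⊢
  rw [hdec]
  rw [spFirstD_getD_stable _ _ c (List.mem_append_right _ (List.mem_singleton_self _)) 0]
  rw [spFirstD_snoc, if_neg hf, PySem.Dict.getD_insert, if_pos rfl]
  simp [List.length_take, Nat.min_eq_left (Nat.le_of_lt hk)]


lemma spA_succ (cs : List Char) (k : Nat) (hk : k < cs.length) :
    spA cs (k + 1) = spStepA (spLastD cs) (spA cs k) ((k : Int), cs[k]) := by
  unfold spA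
  rw [List.take_add_one, List.getElem?_eq_getElem hk]
  simp only [Option.toList_some]
  rw [PySem.List.enumerate_append, List.foldl_append]
  simp [PySem.List.enumerate_cons, PySem.List.enumerate_nil,
    List.length_take, Nat.min_eq_left (Nat.le_of_lt hk)]


lemma spB_succ (cs : List Char) (k : Nat) (hk : k < cs.length) :
    spB cs (k + 1) =
      if cs[k] ∈ cs.take k then spB cs k
      else spStepB (spFirstD cs) (spLastD cs) (spB cs k) cs[k] := by
  unfold spB
  rw [List.take_add_one, List.getElem?_eq_getElem hk]
  simp only [Option.toList_some]
  rw [spFirstD_keys_snoc]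
  by_cases hm : cs[k] ∈ cs.take k
  · simp [hm]
  · simp [hm]

lemma sp_invariant (cs : List Char) (k : Nat) (h1 : 1 ≤ k) (hk : k ≤ cs.length) :
    (∀ j (hj : j < k), (spLastD cs).getD (cs[j]'(by omega)) 0 ≤ (spA cs k).2.1) ∧
    (spA cs k).2.1 ≤ (cs.length : Int) - 1 ∧
    (((spA cs k).1 = (k : Int) ∧ (spA cs k).2.1 = (k : Int) - 1 ∧
        ∃ a, (spB cs k).2 = some (a, (spA cs k).2.1) ∧
          (spA cs k).2.2 = (spB cs k).1 ++ [(spA cs k).2.1 - a + 1]) ∨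
      ((spA cs k).1 ≤ (k : Int) - 1 ∧ (k : Int) ≤ (spA cs k).2.1 ∧
        (spB cs k).2 = some ((spA cs k).1, (spA cs k).2.1) ∧
        (spA cs k).2.2 = (spB cs k).1)) := by
  revert hk
  induction k, h1 using Nat.le_induction with
  | base =>
      intro hk
      have h0 : 0 < cs.length := by omega
      have hA1 := spA_succ cs 0 h0
      have hB1 := spB_succ cs 0 h0
      have hA0 : spA cs 0 = (0, 0, []) := rfl
      have hB0 : spB cs 0 = ([], none) := rfl
      rw [hA0] at hA1; rw [hB0] at hB1
      simp only [show (0 : Nat) + 1 = 1 from rfl] at hA1 hB1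
      rw [hA1, hB1]
      obtain ⟨hL0a, hL0b⟩ := spLastD_bounds cs 0 h0
      have hF0 : (spFirstD cs).getD cs[0] 0 = 0 := spFirstD_getD_fresh cs 0 h0 (by simp)
      simp only [List.take_zero, List.not_mem_nil, if_false, spStepA, spStepB, hF0]
      push_cast
      have hmax : max (0 : Int) ((spLastD cs).getD cs[0] 0) = (spLastD cs).getD cs[0] 0 := by omega
      rw [hmax]
      by_cases hcut : (0 : Int) = (spLastD cs).getD cs[0] 0
      · simp only [if_pos hcut]
        refine ⟨?_, by omega, Or.inl ⟨?_, ?_, 0, ?_, ?_⟩⟩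
        · intro j hj; interval_cases j; exact le_rfl
        · norm_num
        · omega
        · rfl
        · rw [← hcut]; norm_num
      · simp only [if_neg hcut]
        refine ⟨?_, by omega, Or.inr ⟨?_, ?_, ?_, ?_⟩⟩
        · intro j hj; interval_cases j; exact le_rfl
        · norm_num
        · omega
        · trivial
        · trivial
  | succ k h1k ih =>
      intro hk
      have hklt : k < cs.length := by omega
      obtain ⟨ih1, ih2, ih3⟩ := ih (by omega)
      rw [spA_succ cs k hklt, spB_succ cs k hklt]
      obtain ⟨hca, hcb⟩ := spLastD_bounds cs k hklt
      rcases hA : spA cs k with ⟨st, e, res⟩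
      rcases hB : spB cs k with ⟨resB, cur⟩
      rw [hA] at ih1 ih2 ih3
      rw [hB] at ih3
      dsimp only at ih1 ih2 ih3
      by_cases hm : cs[k] ∈ cs.take k
      · -- seen character: B state unchanged, A may still cut
        rw [if_pos hm]
        obtain ⟨j, hj, hje⟩ := List.getElem_of_mem hm
        have hj' : j < k := by
          have := hj; simp [List.length_take] at this; omega
        have hje' : cs[j]'(by omega) = cs[k] := by
          rw [← hje]; simp [List.getElem_take]
        have hLle : (spLastD cs).getD cs[k] 0 ≤ e := by
          have := ih1 j hj'; rw [hje'] at this; exact this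
        rcases ih3 with ⟨hst, he, a, hcur, hres⟩ | ⟨hst, he, hcur, hres⟩
        · exfalso; omega
        · have hmax : max e ((spLastD cs).getD cs[k] 0) = e := by omega
          simp only [spStepA, hmax]
          by_cases hcut : (k : Int) = e
          · simp only [if_pos hcut]
            refine ⟨?_, by omega, Or.inl ⟨by push_cast; ring, by push_cast; omega,
              st, by rw [hcur], by rw [hres, hcut]⟩⟩
            intro i hi
            rcases Nat.lt_or_ge i k with h | h
            · exact ih1 i h
            · have : i = k := by omega
              subst this; omega
          · simp only [if_neg hcut]
            refine ⟨?_, by omega, Or.inr ⟨by push_cast; omega, by push_cast; omega,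
              hcur, hres⟩⟩
            intro i hi
            rcases Nat.lt_or_ge i k with h | h
            · exact ih1 i h
            · have : i = k := by omega
              subst this; omega
      · -- fresh character
        rw [if_neg hm]
        have hF : (spFirstD cs).getD cs[k] 0 = (k : Int) := spFirstD_getD_fresh cs k hklt hm
        rcases ih3 with ⟨hst, he, a, hcur, hres⟩ | ⟨hst, he, hcur, hres⟩
        · -- A cut at k-1: B emits pending chunk
          subst hcur
          have hmax : max e ((spLastD cs).getD cs[k] 0) = (spLastD cs).getD cs[k] 0 := by omega
          simp only [spStepA, spStepB, hmax, hF]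
          rw [if_pos (by omega : (k:Int) > e)]
          by_cases hcut : (k : Int) = (spLastD cs).getD cs[k] 0
          · simp only [if_pos hcut]
            refine ⟨?_, by omega, Or.inl ⟨by push_cast; ring, by push_cast; omega,
              (k : Int), by rw [hcut], by rw [hres]; simp; omega⟩⟩
            intro i hi
            rcases Nat.lt_or_ge i k with h | h
            · have := ih1 i h; omega
            · have : i = k := by omega
              subst this; omega
          · simp only [if_neg hcut]
            refine ⟨?_, by omega, Or.inr ⟨by push_cast; omega, by push_cast; omega,
              by rw [hst], by rw [hres]⟩⟩
            intro i hi
            rcases Nat.lt_or_ge i k with h | h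
            · have := ih1 i h; omega
            · have : i = k := by omega
              subst this; omega
        · -- chunk still open: B extends the current interval
          subst hcur
          simp only [spStepA, spStepB, hF]
          rw [if_neg (by omega : ¬ ((k:Int) > e))]
          by_cases hcut : (k : Int) = max e ((spLastD cs).getD cs[k] 0)
          · simp only [if_pos hcut]
            refine ⟨?_, by omega, Or.inl ⟨by push_cast; ring, by push_cast; omega,
              st, rfl, by rw [hres, ← hcut]⟩⟩
            intro i hi
            rcases Nat.lt_or_ge i k with h | h
            · have := ih1 i h; omega
            · have : i = k := by omega
              subst this; omega
          · simp only [if_neg hcut]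
            refine ⟨?_, by omega, Or.inr ⟨by push_cast; omega, by push_cast; omega,
              trivial, hres⟩⟩
            intro i hi
            rcases Nat.lt_or_ge i k with h | h
            · have := ih1 i h; omega
            · have : i = k := by omega
              subst this; omega

lemma sp_main (cs : List Char) :
    (spA cs cs.length).2.2 =
      (match (spB cs cs.length).2 with
       | none => (spB cs cs.length).1
       | some cur => (spB cs cs.length).1 ++ [cur.2 - cur.1 + 1]) := by
  rcases Nat.eq_zero_or_pos cs.length with h0 | h0
  · have hnil : cs = [] := List.length_eq_zero_iff.mp h0
    subst hnil; rfl
  · obtain ⟨_, h2, h3⟩ := sp_invariant cs cs.length h0 le_rfl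
    rcases h3 with ⟨_, he, a, hcur, hres⟩ | ⟨_, he, hcur, hres⟩
    · rw [hcur, hres]
    · exfalso
      have : (cs.length : Int) ≥ 1 := by exact_mod_cast h0
      omega


-- ===== VERDICT (by name: the statement is the Claim_ definition above) =====
theorem string_partition_spec : Claim_equal_string_partition := by
  intro s _
  show string_partition s = string_partition_alt s
  have hA : string_partition s = (spA s.toList s.toList.length).2.2 := by
    unfold string_partition spA spStepA spLastD
    rw [List.take_length]
  have hB : string_partition_alt s =
      (match (spB s.toList s.toList.length).2 with
       | none => (spB s.toList s.toList.length).1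
       | some cur => (spB s.toList s.toList.length).1 ++ [cur.2 - cur.1 + 1]) := by
    unfold string_partition_alt spB spStepB spFirstD spLastD
    rw [List.take_length]
    dsimp only
    rw [PySem.List.foldl_prod_mk
      (fun (d1 : PySem.Dict Char Int) (p : Int × Char) =>
        if d1.contains p.2 then d1 else d1.insert p.2 p.1)
      (fun (d2 : PySem.Dict Char Int) (p : Int × Char) => d2.insert p.2 p.1)
      (PySem.List.enumerate s.toList) PySem.Dict.empty PySem.Dict.empty]
  rw [hA, hB, sp_main]
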